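-- pv_equiv track=rewrite | github.com/Do-code-ing/Python_Programmers | Coding_Test_Lv3/21_등굣길.py | solution
-- ===== SOURCE A (Python) =====
-- def solution(m, n, puddles):
--     p = 1000000007
--     dr = [(1, 0), (0, 1)]
--     dp = [[-1] * m for _ in range(n)]
--     board = [[0] * m for _ in range(n)]
--     for y, x in puddles:
--         board[x-1][y-1] = 1
--
--     def dfs(x, y):
--         if x == n-1 and y == m-1:
--             return 1
--
--         if dp[x][y] != -1:
--             return dp[x][y] % p
--
--         dp[x][y] = 0
--         for dx, dy in dr:
--             nx = x + dx
--             ny = y + dy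
--             if 0 <= nx < n and 0 <= ny < m and board[nx][ny] == 0:
--                 dp[x][y] += dfs(nx, ny) % p
--
--         return dp[x][y] % p
--
--     return dfs(0, 0)
-- ===== SOURCE B (Python) =====
-- def solution(m, n, puddles):
--     p = 1000000007
--     board = [[0] * m for _ in range(n)]
--     for y, x in puddles:
--         board[x-1][y-1] = 1
--     dp = [[0] * m for _ in range(n)]
--     dp[n-1][m-1] = 1
--     for x in range(n-1, -1, -1):
--         for y in range(m-1, -1, -1):
--             if x == n-1 and y == m-1:
--                 continue
--             t = 0
--             if x + 1 < n and board[x+1][y] == 0: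
--                 t += dp[x+1][y]
--             if y + 1 < m and board[x][y+1] == 0:
--                 t += dp[x][y+1]
--             dp[x][y] = t % p
--     return dp[0][0]
-- ===== Notes on version B (the rewrite author's own statement) =====
-- stated objective: alternative
-- what changed: Replaced A's memoized recursive DFS (top-down, with a -1-sentinel memo table mutated during recursion) by a bottom-up tabulation that fills the dp grid in reverse row/column order with each cell reduced mod p; the board marking from puddles is built the same way.
import Mathlib
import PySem

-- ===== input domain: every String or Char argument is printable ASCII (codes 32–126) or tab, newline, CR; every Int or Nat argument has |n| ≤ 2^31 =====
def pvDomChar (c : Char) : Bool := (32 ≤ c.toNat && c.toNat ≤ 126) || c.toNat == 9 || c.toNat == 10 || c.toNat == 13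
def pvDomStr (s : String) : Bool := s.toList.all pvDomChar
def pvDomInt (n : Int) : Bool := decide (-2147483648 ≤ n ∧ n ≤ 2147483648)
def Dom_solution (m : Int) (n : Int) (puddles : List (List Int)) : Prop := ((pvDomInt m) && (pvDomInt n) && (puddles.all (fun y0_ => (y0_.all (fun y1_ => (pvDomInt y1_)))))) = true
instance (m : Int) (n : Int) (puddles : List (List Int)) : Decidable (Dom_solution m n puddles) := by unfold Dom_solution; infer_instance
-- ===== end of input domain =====

-- B replaces A's memoized DFS by a bottom-up tabulation over the same grid (alternative decomposition, same asymptotic cost).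


-- shared grid primitives (2-D list read g[x][y] and write g[x][y] = v, Python index semantics)
def pvP : Int := 1000000007

def pvGGet (g : List (List Int)) (x y : Int) : Int :=
  PySem.List.pyGetD (PySem.List.pyGetD g x []) y (-1)

def pvGSet (g : List (List Int)) (x y v : Int) : List (List Int) :=
  PySem.List.pySetD g x (PySem.List.pySetD (PySem.List.pyGetD g x []) y v)

-- board construction shared verbatim by A and B ('for y, x in puddles: board[x-1][y-1] = 1')
def pvBoard (m n : Int) (puddles : List (List Int)) : List (List Int) :=
  puddles.foldl
    (fun b pd => pvGSet b (PySem.List.pyGetD pd 1 0 - 1) (PySem.List.pyGetD pd 0 0 - 1) 1)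
    (List.replicate n.toNat (List.replicate m.toNat 0))

-- ===== PORT A =====
-- A's inner 'dfs' with the mutated memo table 'dp' threaded through; fuel is only a
-- totality device (Pre_ guarantees it never runs out on the admitted inputs).
def pvDfsA (n m : Int) (board : List (List Int)) :
    Nat → Int → Int → List (List Int) → Int × List (List Int)
  | 0, _, _, dp => (0, dp)
  | fuel+1, x, y, dp =>
    if x = n - 1 ∧ y = m - 1 then (1, dp)
    else if pvGGet dp x y ≠ -1 then (PySem.Int.mod (pvGGet dp x y) pvP, dp)
    else
      let dp0 := pvGSet dp x y 0
      let dp2 := [((1:Int), (0:Int)), ((0:Int), (1:Int))].foldl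
        (fun dpc d =>
          let nx := x + d.1
          let ny := y + d.2
          if 0 ≤ nx ∧ nx < n ∧ 0 ≤ ny ∧ ny < m ∧ pvGGet board nx ny = 0 then
            let r := pvDfsA n m board fuel nx ny dpc
            pvGSet r.2 x y (pvGGet r.2 x y + PySem.Int.mod r.1 pvP)
          else dpc) dp0
      (PySem.Int.mod (pvGGet dp2 x y) pvP, dp2)

def solution (m : Int) (n : Int) (puddles : List (List Int)) : Int :=
  (pvDfsA n m (pvBoard m n puddles) (n.toNat + m.toNat + 1) 0 0
    (List.replicate n.toNat (List.replicate m.toNat (-1)))).1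

-- ===== PORT B =====
def solution_alt (m : Int) (n : Int) (puddles : List (List Int)) : Int :=
  let board := pvBoard m n puddles
  let dpInit := pvGSet (List.replicate n.toNat (List.replicate m.toNat 0)) (n-1) (m-1) 1
  let dpFin := (PySem.List.pyRange (n-1) (-1) (-1)).foldl (fun dpr x =>
    (PySem.List.pyRange (m-1) (-1) (-1)).foldl (fun dpc y =>
      if x = n - 1 ∧ y = m - 1 then dpc
      else
        let t := (if x + 1 < n ∧ pvGGet board (x+1) y = 0 then pvGGet dpc (x+1) y else 0)
               + (if y + 1 < m ∧ pvGGet board x (y+1) = 0 then pvGGet dpc x (y+1) else 0)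
        pvGSet dpc x y (PySem.Int.mod t pvP)) dpr) dpInit
  pvGGet dpFin 0 0

-- ===== PRECONDITION & SPEC =====
-- Pre_ excludes exactly the inputs where A raises: a non-positive grid side (IndexError on dp[0][0]
-- or dp[n-1]), a puddle entry that is not a 2-element pair (ValueError on unpacking), and a puddle
-- coordinate outside Python's (negative-index-inclusive) range for the board (IndexError).
def Pre_solution (m : Int) (n : Int) (puddles : List (List Int)) : Prop :=
  1 ≤ m ∧ 1 ≤ n ∧
  ∀ pd ∈ puddles, pd.length = 2 ∧
    PySem.Raise.InRange n.toNat (pd.getD 1 0 - 1) ∧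
    PySem.Raise.InRange m.toNat (pd.getD 0 0 - 1)
instance (m : Int) (n : Int) (puddles : List (List Int)) : Decidable (Pre_solution m n puddles) := by
  unfold Pre_solution; infer_instance

def pvWitness_solution : Int × Int × List (List Int) := (4, 3, [[2, 2]])

def Spec_solution (m : Int) (n : Int) (puddles : List (List Int)) (out : Int) : Prop := out = solution_alt m n puddles
instance (m : Int) (n : Int) (puddles : List (List Int)) (out : Int) : Decidable (Spec_solution m n puddles out) := by unfold Spec_solution; infer_instance

-- ===== CLAIM (what is proved, stated in full; the proofs are below) =====
def Claim_equal_solution : Prop := ∀ (m : Int) (n : Int) (puddles : List (List Int)), Dom_solution m n puddles → Pre_solution m n puddles → Spec_solution m n puddles (solution m n puddles)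

-- ===== LEMMAS AND PROOFS =====

-- the common mathematical value: number of down/right paths (neighbour-filtered, as both programs
-- filter) from (x,y) to (n-1,m-1), taken mod pvP at every cell
def pvCnt (n m : Int) (bd : Int → Int → Int) (x y : Int) : Int :=
  if x = n - 1 ∧ y = m - 1 then 1
  else if _h : x < n ∧ y < m then
    PySem.Int.mod
      ((if x + 1 < n ∧ bd (x+1) y = 0 then pvCnt n m bd (x+1) y else 0)
       + (if y + 1 < m ∧ bd x (y+1) = 0 then pvCnt n m bd x (y+1) else 0)) pvP
  else 0
  termination_by ((n - x) + (m - y)).toNat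
  decreasing_by all_goals omega

lemma pvCnt_bounds (n m : Int) (bd : Int → Int → Int) (x y : Int) :
    0 ≤ pvCnt n m bd x y ∧ pvCnt n m bd x y < pvP := by
  have hp : (0:Int) < pvP := by norm_num [pvP]
  rw [pvCnt]
  by_cases h1 : x = n - 1 ∧ y = m - 1
  · rw [if_pos h1]; exact ⟨by norm_num, by norm_num [pvP]⟩
  · rw [if_neg h1]
    by_cases h2 : x < n ∧ y < m
    · rw [dif_pos h2]
      exact ⟨PySem.Int.mod_nonneg _ hp, PySem.Int.mod_lt _ hp⟩
    · rw [dif_neg h2]; exact ⟨le_refl 0, hp⟩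

lemma pvCnt_mod (n m : Int) (bd : Int → Int → Int) (x y : Int) :
    PySem.Int.mod (pvCnt n m bd x y) pvP = pvCnt n m bd x y := by
  have h := pvCnt_bounds n m bd x y
  rw [PySem.Int.mod_eq_emod_of_pos (by norm_num [pvP] : (0:Int) < pvP)]
  exact Int.emod_eq_of_lt h.1 h.2

-- rectangular shape
def pvShape (N M : Nat) (g : List (List Int)) : Prop :=
  g.length = N ∧ ∀ r ∈ g, r.length = M

lemma pvShape_replicate (N M : Nat) (c : Int) :
    pvShape N M (List.replicate N (List.replicate M c)) := by
  constructor
  · simp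
  · intro r hr
    simp [List.eq_of_mem_replicate hr]

lemma pvPyGetD_nonneg {α : Type} (xs : List α) (i : Int) (d : α) (h : 0 ≤ i) :
    PySem.List.pyGetD xs i d = xs.getD i.toNat d := by
  simp [PySem.List.pyGetD, PySem.List.pyGet?_of_nonneg _ h, List.getD]

lemma pvGGet_nonneg (g : List (List Int)) (x y : Int) (hx : 0 ≤ x) (hy : 0 ≤ y) :
    pvGGet g x y = (g.getD x.toNat []).getD y.toNat (-1) := by
  simp [pvGGet, pvPyGetD_nonneg _ _ _ hx, pvPyGetD_nonneg _ _ _ hy]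

lemma pvGSet_nonneg (g : List (List Int)) (x y v : Int) (hx : 0 ≤ x) (hy : 0 ≤ y) :
    pvGSet g x y v = g.set x.toNat ((g.getD x.toNat []).set y.toNat v) := by
  simp [pvGSet, pvPyGetD_nonneg _ _ _ hx, PySem.List.pySetD_of_nonneg _ _ hx,
    PySem.List.pySetD_of_nonneg _ _ hy]

lemma pvRow_length (N M : Nat) (g : List (List Int)) (hg : pvShape N M g)
    (j : Nat) (hj : j < N) : (g.getD j []).length = M := by
  have hgl := hg.1
  have hjl : j < g.length := by omega
  have : g.getD j [] = g[j] := by simp [List.getD, List.getElem?_eq_getElem hjl]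
  rw [this]
  exact hg.2 _ (List.getElem_mem hjl)

lemma pvShape_gset (N M : Nat) (g : List (List Int)) (x y v : Int)
    (hg : pvShape N M g)
    (hx : 0 ≤ x) (hx' : x < (N:Int)) (hy : 0 ≤ y) (_hy' : y < (M:Int)) :
    pvShape N M (pvGSet g x y v) := by
  rw [pvGSet_nonneg _ _ _ _ hx hy]
  refine ⟨by simp [hg.1], ?_⟩
  intro r hr
  rcases List.mem_or_eq_of_mem_set hr with h | h
  · exact hg.2 _ h
  · subst h
    simpa [List.getD] using pvRow_length N M g hg x.toNat (by omega)

lemma pvGGet_replicate (N M : Nat) (c : Int) (x y : Int)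
    (hx : 0 ≤ x) (hx' : x < (N:Int)) (hy : 0 ≤ y) (hy' : y < (M:Int)) :
    pvGGet (List.replicate N (List.replicate M c)) x y = c := by
  have h1 : x.toNat < N := by omega
  have h2 : y.toNat < M := by omega
  rw [pvGGet_nonneg _ _ _ hx hy]
  simp [List.getD, h1, h2]

lemma pvGGet_gset (N M : Nat) (g : List (List Int)) (x y v x' y' : Int)
    (hg : pvShape N M g)
    (hx : 0 ≤ x) (hx' : x < (N:Int)) (hy : 0 ≤ y) (hy' : y < (M:Int))
    (ha : 0 ≤ x') (hb : 0 ≤ y') :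
    pvGGet (pvGSet g x y v) x' y' = if x' = x ∧ y' = y then v else pvGGet g x' y' := by
  have hgl := hg.1
  have hxl : x.toNat < g.length := by omega
  have hrow : (g.getD x.toNat []).length = M := pvRow_length N M g hg x.toNat (by omega)
  rw [pvGGet_nonneg g x' y' ha hb, pvGSet_nonneg _ _ _ _ hx hy, pvGGet_nonneg _ _ _ ha hb]
  by_cases hxx : x' = x
  · subst hxx
    have hset : ((g.set x'.toNat ((g.getD x'.toNat []).set y.toNat v)).getD x'.toNat [])
        = (g.getD x'.toNat []).set y.toNat v := by
      simp [List.getD, hxl]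
    rw [hset]
    by_cases hyy : y' = y
    · subst hyy
      have hyl : y'.toNat < (g.getD x'.toNat []).length := by omega
      have hyl2 : y'.toNat < (g[x'.toNat]?.getD []).length := by simpa [List.getD] using hyl
      simp [List.getD, hyl2]
    · have hne : y.toNat ≠ y'.toNat := by omega
      simp [List.getD, List.getElem?_set_ne hne, hyy]
      
  · have hne : x.toNat ≠ x'.toNat := by omega
    have : ((g.set x.toNat ((g.getD x.toNat []).set y.toNat v)).getD x'.toNat [])
        = g.getD x'.toNat [] := by
      simp [List.getD, List.getElem?_set_ne hne]
    rw [this]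
    simp [hxx]

-- memo-table invariant of A's dfs: every cell whose coordinate sum is at least s is either
-- still -1 or stores a value whose residue is the true count
def pvInv (n m : Int) (board : List (List Int)) (s : Int) (dp : List (List Int)) : Prop :=
  ∀ a b : Int, 0 ≤ a → a < n → 0 ≤ b → b < m → s ≤ a + b →
    pvGGet dp a b = -1 ∨
      PySem.Int.mod (pvGGet dp a b) pvP = pvCnt n m (pvGGet board) a b

lemma pvDfsA_correct (n m : Int) (board : List (List Int)) (hn : 1 ≤ n) (hm : 1 ≤ m) :
    ∀ (fuel : Nat) (x y : Int) (dp : List (List Int)),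
      0 ≤ x → x < n → 0 ≤ y → y < m →
      ((n - x) + (m - y)).toNat ≤ fuel →
      pvShape n.toNat m.toNat dp →
      pvInv n m board (x + y) dp →
      (pvDfsA n m board fuel x y dp).1 = pvCnt n m (pvGGet board) x y ∧
      pvShape n.toNat m.toNat (pvDfsA n m board fuel x y dp).2 ∧
      pvInv n m board (x + y) (pvDfsA n m board fuel x y dp).2 ∧
      (∀ a b : Int, 0 ≤ a → 0 ≤ b → a + b < x + y →
        pvGGet (pvDfsA n m board fuel x y dp).2 a b = pvGGet dp a b) := by
  intro fuel
  induction fuel with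
  | zero =>
    intro x y dp hx hx' hy hy' hfuel hshape hinv
    exfalso; omega
  | succ fuel ih =>
    intro x y dp hx hx' hy hy' hfuel hshape hinv
    have child : ∀ nx ny dpc, 0 ≤ nx → nx < n → 0 ≤ ny → ny < m → nx + ny = x + y + 1 →
        pvShape n.toNat m.toNat dpc → pvInv n m board (x + y + 1) dpc →
        (let r := pvDfsA n m board fuel nx ny dpc
         let u := pvGSet r.2 x y (pvGGet r.2 x y + PySem.Int.mod r.1 pvP)
         pvShape n.toNat m.toNat u ∧ pvInv n m board (x + y + 1) u ∧
         pvGGet u x y = pvGGet dpc x y + pvCnt n m (pvGGet board) nx ny ∧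
         (∀ a b : Int, 0 ≤ a → 0 ≤ b → a + b ≤ x + y → ¬(a = x ∧ b = y) →
            pvGGet u a b = pvGGet dpc a b)) := by
      intro nx ny dpc hnx hnx' hny hny' hsum hcs hci
      have hfc : ((n - nx) + (m - ny)).toNat ≤ fuel := by omega
      have hci' : pvInv n m board (nx + ny) dpc := by rw [hsum]; exact hci
      obtain ⟨h1, h2, h3, h4⟩ := ih nx ny dpc hnx hnx' hny hny' hfc hcs hci'
      set r := pvDfsA n m board fuel nx ny dpc with hr
      have hget : ∀ a b : Int, 0 ≤ a → 0 ≤ b →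
          pvGGet (pvGSet r.2 x y (pvGGet r.2 x y + PySem.Int.mod r.1 pvP)) a b
          = if a = x ∧ b = y then pvGGet r.2 x y + PySem.Int.mod r.1 pvP else pvGGet r.2 a b :=
        fun a b haa hbb => pvGGet_gset n.toNat m.toNat r.2 x y _ a b h2
          hx (by omega) hy (by omega) haa hbb
      have hxy : pvGGet r.2 x y = pvGGet dpc x y := h4 x y hx hy (by omega)
      refine ⟨?_, ?_, ?_, ?_⟩
      · exact pvShape_gset n.toNat m.toNat r.2 x y _ h2 hx (by omega) hy (by omega)
      · intro a b haa haa' hbb hbb' hs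
        rw [hget a b haa hbb, if_neg (by omega)]
        exact h3 a b haa haa' hbb hbb' (by omega)
      · rw [hget x y hx hy, if_pos ⟨rfl, rfl⟩, hxy, h1, pvCnt_mod]
      · intro a b haa hbb hs hne
        rw [hget a b haa hbb, if_neg hne]
        exact h4 a b haa hbb (by omega)
    by_cases htar : x = n - 1 ∧ y = m - 1
    · rw [pvDfsA, if_pos htar]
      refine ⟨?_, hshape, hinv, fun a b _ _ _ => rfl⟩
      rw [pvCnt, if_pos htar]
    · by_cases hmemo : pvGGet dp x y ≠ -1
      · rw [pvDfsA, if_neg htar, if_pos hmemo]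
        refine ⟨?_, hshape, hinv, fun a b _ _ _ => rfl⟩
        rcases hinv x y hx hx' hy hy' (le_refl _) with h | h
        · exact absurd h hmemo
        · exact h
      · -- dp[x][y] = -1 : compute
        have hdp0s : pvShape n.toNat m.toNat (pvGSet dp x y 0) :=
          pvShape_gset n.toNat m.toNat dp x y 0 hshape hx (by omega) hy (by omega)
        have hget0 : ∀ a b : Int, 0 ≤ a → 0 ≤ b →
            pvGGet (pvGSet dp x y 0) a b = if a = x ∧ b = y then 0 else pvGGet dp a b :=
          fun a b haa hbb => pvGGet_gset n.toNat m.toNat dp x y 0 a b hshape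
            hx (by omega) hy (by omega) haa hbb
        have hdp0i : pvInv n m board (x + y + 1) (pvGSet dp x y 0) := by
          intro a b haa haa' hbb hbb' hs
          rw [hget0 a b haa hbb, if_neg (by omega)]
          exact hinv a b haa haa' hbb hbb' (by omega)
        have hdp0xy : pvGGet (pvGSet dp x y 0) x y = 0 := by
          rw [hget0 x y hx hy, if_pos ⟨rfl, rfl⟩]
        have hcnt : pvCnt n m (pvGGet board) x y = PySem.Int.mod
            ((if x + 1 < n ∧ pvGGet board (x+1) y = 0 then pvCnt n m (pvGGet board) (x+1) y else 0)
             + (if y + 1 < m ∧ pvGGet board x (y+1) = 0 then pvCnt n m (pvGGet board) x (y+1) else 0)) pvP := by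
          rw [pvCnt, if_neg htar, dif_pos ⟨hx', hy'⟩]
        have assemble : ∀ dpf : List (List Int), pvShape n.toNat m.toNat dpf →
            pvInv n m board (x + y + 1) dpf →
            PySem.Int.mod (pvGGet dpf x y) pvP = pvCnt n m (pvGGet board) x y →
            (∀ a b : Int, 0 ≤ a → 0 ≤ b → a + b ≤ x + y → ¬(a = x ∧ b = y) →
               pvGGet dpf a b = pvGGet dp a b) →
            (PySem.Int.mod (pvGGet dpf x y) pvP = pvCnt n m (pvGGet board) x y ∧
             pvShape n.toNat m.toNat dpf ∧ pvInv n m board (x + y) dpf ∧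
             (∀ a b : Int, 0 ≤ a → 0 ≤ b → a + b < x + y → pvGGet dpf a b = pvGGet dp a b)) := by
          intro dpf hsf hif hvf huf
          refine ⟨hvf, hsf, ?_, ?_⟩
          · intro a b haa haa' hbb hbb' hs
            by_cases hab : a = x ∧ b = y
            · obtain ⟨rfl, rfl⟩ := hab; right; exact hvf
            · by_cases hs2 : x + y + 1 ≤ a + b
              · exact hif a b haa haa' hbb hbb' hs2
              · rw [huf a b haa hbb (by omega) hab]
                exact hinv a b haa haa' hbb hbb' (by omega)
          · intro a b haa hbb hs
            exact huf a b haa hbb (by omega) (by rintro ⟨rfl, rfl⟩; omega)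
        rw [pvDfsA, if_neg htar, if_neg hmemo]
        simp only [List.foldl_cons, List.foldl_nil, add_zero]
        by_cases hc1 : x + 1 < n ∧ pvGGet board (x+1) y = 0 <;>
          by_cases hc2 : y + 1 < m ∧ pvGGet board x (y+1) = 0
        · -- both neighbours taken
          rw [if_pos (show 0 ≤ x + 1 ∧ x + 1 < n ∧ 0 ≤ y ∧ y < m ∧ pvGGet board (x+1) y = 0 from
                ⟨by omega, hc1.1, hy, hy', hc1.2⟩),
              if_pos (show 0 ≤ x ∧ x < n ∧ 0 ≤ y + 1 ∧ y + 1 < m ∧ pvGGet board x (y+1) = 0 from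
                ⟨hx, hx', by omega, hc2.1, hc2.2⟩)]
          obtain ⟨s1, i1, v1, u1un⟩ := child (x+1) y (pvGSet dp x y 0) (by omega) hc1.1 hy hy'
            (by omega) hdp0s hdp0i
          obtain ⟨s2, i2, v2, u2un⟩ := child x (y+1)
            (pvGSet (pvDfsA n m board fuel (x+1) y (pvGSet dp x y 0)).2 x y
              (pvGGet (pvDfsA n m board fuel (x+1) y (pvGSet dp x y 0)).2 x y +
                PySem.Int.mod (pvDfsA n m board fuel (x+1) y (pvGSet dp x y 0)).1 pvP))
            hx hx' (by omega) hc2.1 (by omega) s1 i1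
          refine assemble _ s2 i2 ?_ ?_
          · rw [v2, v1, hdp0xy, hcnt, if_pos hc1, if_pos hc2, zero_add]
          · intro a b haa hbb hs hab
            rw [u2un a b haa hbb hs hab, u1un a b haa hbb hs hab, hget0 a b haa hbb, if_neg hab]
        · -- only the down neighbour
          rw [if_pos (show 0 ≤ x + 1 ∧ x + 1 < n ∧ 0 ≤ y ∧ y < m ∧ pvGGet board (x+1) y = 0 from
                ⟨by omega, hc1.1, hy, hy', hc1.2⟩),
              if_neg (show ¬(0 ≤ x ∧ x < n ∧ 0 ≤ y + 1 ∧ y + 1 < m ∧ pvGGet board x (y+1) = 0) from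
                fun h => hc2 ⟨h.2.2.2.1, h.2.2.2.2⟩)]
          obtain ⟨s1, i1, v1, u1un⟩ := child (x+1) y (pvGSet dp x y 0) (by omega) hc1.1 hy hy'
            (by omega) hdp0s hdp0i
          refine assemble _ s1 i1 ?_ ?_
          · rw [v1, hdp0xy, hcnt, if_pos hc1, if_neg hc2, zero_add, add_zero]
          · intro a b haa hbb hs hab
            rw [u1un a b haa hbb hs hab, hget0 a b haa hbb, if_neg hab]
        · -- only the right neighbour
          rw [if_neg (show ¬(0 ≤ x + 1 ∧ x + 1 < n ∧ 0 ≤ y ∧ y < m ∧ pvGGet board (x+1) y = 0) from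
                fun h => hc1 ⟨h.2.1, h.2.2.2.2⟩),
              if_pos (show 0 ≤ x ∧ x < n ∧ 0 ≤ y + 1 ∧ y + 1 < m ∧ pvGGet board x (y+1) = 0 from
                ⟨hx, hx', by omega, hc2.1, hc2.2⟩)]
          obtain ⟨s1, i1, v1, u1un⟩ := child x (y+1) (pvGSet dp x y 0) hx hx' (by omega) hc2.1
            (by omega) hdp0s hdp0i
          refine assemble _ s1 i1 ?_ ?_
          · rw [v1, hdp0xy, hcnt, if_neg hc1, if_pos hc2, zero_add]
          · intro a b haa hbb hs hab
            rw [u1un a b haa hbb hs hab, hget0 a b haa hbb, if_neg hab]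
        · -- no neighbour taken
          rw [if_neg (show ¬(0 ≤ x + 1 ∧ x + 1 < n ∧ 0 ≤ y ∧ y < m ∧ pvGGet board (x+1) y = 0) from
                fun h => hc1 ⟨h.2.1, h.2.2.2.2⟩),
              if_neg (show ¬(0 ≤ x ∧ x < n ∧ 0 ≤ y + 1 ∧ y + 1 < m ∧ pvGGet board x (y+1) = 0) from
                fun h => hc2 ⟨h.2.2.2.1, h.2.2.2.2⟩)]
          refine assemble _ hdp0s hdp0i ?_ ?_
          · rw [hdp0xy, hcnt, if_neg hc1, if_neg hc2, add_zero]
          · intro a b haa hbb hs hab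
            rw [hget0 a b haa hbb, if_neg hab]

lemma solution_eq_cnt (m n : Int) (puddles : List (List Int)) (hm : 1 ≤ m) (hn : 1 ≤ n) :
    solution m n puddles = pvCnt n m (pvGGet (pvBoard m n puddles)) 0 0 := by
  have hinv0 : pvInv n m (pvBoard m n puddles) (0 + 0)
      (List.replicate n.toNat (List.replicate m.toNat (-1))) := by
    intro a b haa haa' hbb hbb' _
    left
    exact pvGGet_replicate n.toNat m.toNat (-1) a b haa (by omega) hbb (by omega)
  exact (pvDfsA_correct n m (pvBoard m n puddles) hn hm (n.toNat + m.toNat + 1) 0 0 _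
    le_rfl (by omega) le_rfl (by omega) (by omega)
    (pvShape_replicate n.toNat m.toNat (-1)) hinv0).1

-- which cells already hold their final count during B's tabulation
def pvDone (n m x0 y0 a b : Int) : Bool :=
  decide (x0 < a ∨ (a = x0 ∧ y0 < b) ∨ (a = n - 1 ∧ b = m - 1))

lemma pvDone_iff (n m x0 y0 a b : Int) :
    pvDone n m x0 y0 a b = true ↔
      (x0 < a ∨ (a = x0 ∧ y0 < b) ∨ (a = n - 1 ∧ b = m - 1)) := decide_eq_true_iff

-- tabulation invariant of B
def pvTab (n m : Int) (board : List (List Int)) (x0 y0 : Int) (dp : List (List Int)) : Prop :=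
  ∀ a b : Int, 0 ≤ a → a < n → 0 ≤ b → b < m →
    pvGGet dp a b =
      if pvDone n m x0 y0 a b then pvCnt n m (pvGGet board) a b else 0

lemma pvTab_mono (n m : Int) (board : List (List Int)) (x0 y0 x1 y1 : Int)
    (dp : List (List Int))
    (h : ∀ a b : Int, 0 ≤ a → a < n → 0 ≤ b → b < m →
      (pvDone n m x0 y0 a b = true ↔ pvDone n m x1 y1 a b = true))
    (ht : pvTab n m board x0 y0 dp) : pvTab n m board x1 y1 dp := by
  intro a b haa haa' hbb hbb'
  rw [ht a b haa haa' hbb hbb']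
  by_cases hd : pvDone n m x0 y0 a b = true
  · rw [if_pos hd, if_pos ((h a b haa haa' hbb hbb').mp hd)]
  · rw [if_neg hd, if_neg (fun hq => hd ((h a b haa haa' hbb hbb').mpr hq))]

lemma pvInnerB (n m : Int) (board : List (List Int)) (hn : 1 ≤ n) (hm : 1 ≤ m)
    (x : Int) (hx : 0 ≤ x) (hx' : x < n) :
    ∀ (k : Nat) (y0 : Int) (dpc : List (List Int)), y0 < m → (y0 + 1).toNat = k →
      pvShape n.toNat m.toNat dpc → pvTab n m board x y0 dpc →
      pvShape n.toNat m.toNat ((PySem.List.pyRange y0 (-1) (-1)).foldl (fun dpc y =>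
        if x = n - 1 ∧ y = m - 1 then dpc
        else pvGSet dpc x y (PySem.Int.mod
          ((if x + 1 < n ∧ pvGGet board (x+1) y = 0 then pvGGet dpc (x+1) y else 0)
           + (if y + 1 < m ∧ pvGGet board x (y+1) = 0 then pvGGet dpc x (y+1) else 0)) pvP)) dpc) ∧
      pvTab n m board x (-1) ((PySem.List.pyRange y0 (-1) (-1)).foldl (fun dpc y =>
        if x = n - 1 ∧ y = m - 1 then dpc
        else pvGSet dpc x y (PySem.Int.mod
          ((if x + 1 < n ∧ pvGGet board (x+1) y = 0 then pvGGet dpc (x+1) y else 0)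
           + (if y + 1 < m ∧ pvGGet board x (y+1) = 0 then pvGGet dpc x (y+1) else 0)) pvP)) dpc) := by
  intro k
  induction k with
  | zero =>
    intro y0 dpc hy0 hk hs ht
    have hnil : PySem.List.pyRange y0 (-1) (-1) = [] := PySem.List.pyRange_neg_one_eq_nil (by omega)
    rw [hnil, List.foldl_nil]
    exact ⟨hs, pvTab_mono n m board x y0 x (-1) dpc
      (fun a b haa haa' hbb hbb' => by rw [pvDone_iff, pvDone_iff]; omega) ht⟩
  | succ k ihk =>
    intro y0 dpc hy0 hk hs ht
    have hy00 : 0 ≤ y0 := by omega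
    have hcons : PySem.List.pyRange y0 (-1) (-1) = y0 :: PySem.List.pyRange (y0 - 1) (-1) (-1) :=
      PySem.List.pyRange_neg_one_cons (by omega)
    rw [hcons, List.foldl_cons]
    by_cases htar : x = n - 1 ∧ y0 = m - 1
    · rw [if_pos htar]
      refine ihk (y0 - 1) dpc (by omega) (by omega) hs ?_
      exact pvTab_mono n m board x y0 x (y0 - 1) dpc
        (fun a b haa haa' hbb hbb' => by
          obtain ⟨h1, h2⟩ := htar; rw [pvDone_iff, pvDone_iff]; omega) ht
    · rw [if_neg htar]
      have hget : ∀ a b : Int, 0 ≤ a → 0 ≤ b →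
          pvGGet (pvGSet dpc x y0 (PySem.Int.mod
            ((if x + 1 < n ∧ pvGGet board (x+1) y0 = 0 then pvGGet dpc (x+1) y0 else 0)
             + (if y0 + 1 < m ∧ pvGGet board x (y0+1) = 0 then pvGGet dpc x (y0+1) else 0)) pvP)) a b
          = if a = x ∧ b = y0 then (PySem.Int.mod
            ((if x + 1 < n ∧ pvGGet board (x+1) y0 = 0 then pvGGet dpc (x+1) y0 else 0)
             + (if y0 + 1 < m ∧ pvGGet board x (y0+1) = 0 then pvGGet dpc x (y0+1) else 0)) pvP)
            else pvGGet dpc a b :=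
        fun a b haa hbb => pvGGet_gset n.toNat m.toNat dpc x y0 _ a b hs
          hx (by omega) hy00 (by omega) haa hbb
      have hval : PySem.Int.mod
          ((if x + 1 < n ∧ pvGGet board (x+1) y0 = 0 then pvGGet dpc (x+1) y0 else 0)
           + (if y0 + 1 < m ∧ pvGGet board x (y0+1) = 0 then pvGGet dpc x (y0+1) else 0)) pvP
          = pvCnt n m (pvGGet board) x y0 := by
        have e1 : (if x + 1 < n ∧ pvGGet board (x+1) y0 = 0 then pvGGet dpc (x+1) y0 else 0)
            = (if x + 1 < n ∧ pvGGet board (x+1) y0 = 0 then pvCnt n m (pvGGet board) (x+1) y0 else 0) := by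
          by_cases h1 : x + 1 < n ∧ pvGGet board (x+1) y0 = 0
          · have hd1 : pvDone n m x y0 (x+1) y0 = true := by
              rw [pvDone_iff]; omega
            have h0x1 : (0:Int) ≤ x + 1 := by omega
            rw [if_pos h1, if_pos h1, ht (x+1) y0 h0x1 h1.1 hy00 hy0, if_pos hd1]
          · rw [if_neg h1, if_neg h1]
        have e2 : (if y0 + 1 < m ∧ pvGGet board x (y0+1) = 0 then pvGGet dpc x (y0+1) else 0)
            = (if y0 + 1 < m ∧ pvGGet board x (y0+1) = 0 then pvCnt n m (pvGGet board) x (y0+1) else 0) := by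
          by_cases h2 : y0 + 1 < m ∧ pvGGet board x (y0+1) = 0
          · have hd2 : pvDone n m x y0 x (y0+1) = true := by
              rw [pvDone_iff]; omega
            have h0y1 : (0:Int) ≤ y0 + 1 := by omega
            rw [if_pos h2, if_pos h2, ht x (y0+1) hx hx' h0y1 h2.1, if_pos hd2]
          · rw [if_neg h2, if_neg h2]
        rw [e1, e2]
        conv_rhs => rw [pvCnt]
        rw [if_neg htar, dif_pos ⟨hx', hy0⟩]
      refine ihk (y0 - 1) _ (by omega) (by omega)
        (pvShape_gset n.toNat m.toNat dpc x y0 _ hs hx (by omega) hy00 (by omega)) ?_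
      intro a b haa haa' hbb hbb'
      rw [hget a b haa hbb]
      by_cases hab : a = x ∧ b = y0
      · obtain ⟨rfl, rfl⟩ := hab
        have hd : pvDone n m a (b - 1) a b = true := by
          rw [pvDone_iff]; omega
        rw [if_pos (⟨rfl, rfl⟩ : a = a ∧ b = b), hval, if_pos hd]
      · rw [if_neg hab, ht a b haa haa' hbb hbb']
        have : pvDone n m x y0 a b = true ↔ pvDone n m x (y0 - 1) a b = true := by
          rw [pvDone_iff, pvDone_iff]
          constructor <;> intro h <;> omega
        by_cases hd : pvDone n m x y0 a b = true
        · rw [if_pos hd, if_pos (this.mp hd)]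
        · rw [if_neg hd, if_neg (fun hq => hd (this.mpr hq))]

lemma pvOuterB (n m : Int) (board : List (List Int)) (hn : 1 ≤ n) (hm : 1 ≤ m) :
    ∀ (k : Nat) (x0 : Int) (dpr : List (List Int)), x0 < n → (x0 + 1).toNat = k →
      pvShape n.toNat m.toNat dpr → pvTab n m board x0 (m - 1) dpr →
      pvShape n.toNat m.toNat ((PySem.List.pyRange x0 (-1) (-1)).foldl (fun dpr x =>
        (PySem.List.pyRange (m - 1) (-1) (-1)).foldl (fun dpc y =>
          if x = n - 1 ∧ y = m - 1 then dpc
          else pvGSet dpc x y (PySem.Int.mod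
            ((if x + 1 < n ∧ pvGGet board (x+1) y = 0 then pvGGet dpc (x+1) y else 0)
             + (if y + 1 < m ∧ pvGGet board x (y+1) = 0 then pvGGet dpc x (y+1) else 0)) pvP)) dpr) dpr) ∧
      pvTab n m board (-1) (m - 1) ((PySem.List.pyRange x0 (-1) (-1)).foldl (fun dpr x =>
        (PySem.List.pyRange (m - 1) (-1) (-1)).foldl (fun dpc y =>
          if x = n - 1 ∧ y = m - 1 then dpc
          else pvGSet dpc x y (PySem.Int.mod
            ((if x + 1 < n ∧ pvGGet board (x+1) y = 0 then pvGGet dpc (x+1) y else 0)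
             + (if y + 1 < m ∧ pvGGet board x (y+1) = 0 then pvGGet dpc x (y+1) else 0)) pvP)) dpr) dpr) := by
  intro k
  induction k with
  | zero =>
    intro x0 dpr hx0 hk hs ht
    have hnil : PySem.List.pyRange x0 (-1) (-1) = [] := PySem.List.pyRange_neg_one_eq_nil (by omega)
    rw [hnil, List.foldl_nil]
    exact ⟨hs, pvTab_mono n m board x0 (m-1) (-1) (m-1) dpr
      (fun a b haa haa' hbb hbb' => by rw [pvDone_iff, pvDone_iff]; omega) ht⟩
  | succ k ihk =>
    intro x0 dpr hx0 hk hs ht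
    have hx00 : 0 ≤ x0 := by omega
    have hcons : PySem.List.pyRange x0 (-1) (-1) = x0 :: PySem.List.pyRange (x0 - 1) (-1) (-1) :=
      PySem.List.pyRange_neg_one_cons (by omega)
    rw [hcons, List.foldl_cons]
    obtain ⟨hs', ht'⟩ := pvInnerB n m board hn hm x0 hx00 hx0 (m - 1 + 1).toNat (m - 1) dpr
      (by omega) rfl hs (pvTab_mono n m board x0 (m-1) x0 (m-1) dpr (fun _ _ _ _ _ _ => Iff.rfl) ht)
    refine ihk (x0 - 1) _ (by omega) (by omega) hs' ?_
    exact pvTab_mono n m board x0 (-1) (x0 - 1) (m - 1) _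
      (fun a b haa haa' hbb hbb' => by rw [pvDone_iff, pvDone_iff]; omega) ht'

lemma solution_alt_eq_cnt (m n : Int) (puddles : List (List Int)) (hm : 1 ≤ m) (hn : 1 ≤ n) :
    solution_alt m n puddles = pvCnt n m (pvGGet (pvBoard m n puddles)) 0 0 := by
  set board := pvBoard m n puddles with hb
  have hs0 : pvShape n.toNat m.toNat
      (pvGSet (List.replicate n.toNat (List.replicate m.toNat 0)) (n-1) (m-1) 1) :=
    pvShape_gset n.toNat m.toNat _ (n-1) (m-1) 1 (pvShape_replicate _ _ _)
      (by omega) (by omega) (by omega) (by omega)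
  have ht0 : pvTab n m board (n-1) (m-1)
      (pvGSet (List.replicate n.toNat (List.replicate m.toNat 0)) (n-1) (m-1) 1) := by
    intro a b haa haa' hbb hbb'
    rw [pvGGet_gset n.toNat m.toNat _ (n-1) (m-1) 1 a b (pvShape_replicate _ _ _)
      (by omega) (by omega) (by omega) (by omega) haa hbb]
    by_cases hab : a = n - 1 ∧ b = m - 1
    · have hd : pvDone n m (n-1) (m-1) a b = true := by
        rw [pvDone_iff]; omega
      rw [if_pos hab, if_pos hd]
      obtain ⟨rfl, rfl⟩ := hab
      rw [pvCnt, if_pos ⟨rfl, rfl⟩]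
    · have hd : ¬ pvDone n m (n-1) (m-1) a b = true := by
        rw [pvDone_iff]; omega
      rw [if_neg hab, if_neg hd,
        pvGGet_replicate n.toNat m.toNat 0 a b haa (by omega) hbb (by omega)]
  obtain ⟨hsf, htf⟩ := pvOuterB n m board hn hm (n - 1 + 1).toNat (n-1) _ (by omega) rfl hs0 ht0
  show pvGGet _ 0 0 = _
  have hd : pvDone n m (-1) (m-1) 0 0 = true := by
    rw [pvDone_iff]; omega
  rw [htf 0 0 le_rfl (by omega) le_rfl (by omega), if_pos hd]

-- ===== VERDICT (by name: the statement is the Claim_ definition above) =====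
theorem solution_spec : Claim_equal_solution := by
  intro m n puddles _ hpre
  unfold Spec_solution
  rw [solution_eq_cnt m n puddles hpre.1 hpre.2.1,
      solution_alt_eq_cnt m n puddles hpre.1 hpre.2.1]
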